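-- pv_equiv track=rewrite | github.com/Leibniz23/MC102 | tarefa08/func8.py | ord_lista
-- ===== SOURCE A (Python) =====
-- def alfabetica(palavra_a, palavra_b):
--     """
--     Verifica se a palavra_a vem antes da palavra_b na ordem alfabética, se isso ocorrer ela retorna
--     True, se for o contrário retorna False
--     """
--     resp = False
--     for i in range(len(palavra_b)):
--         if i < len(palavra_a):
--             if palavra_a[i] != palavra_b[i]:
--                 if palavra_a[i] < palavra_b[i] :
--                     resp = True
--                 else:
--                     resp = False
--                 return resp
--         else:
--             resp = True
--     return resp
--
-- def ord_lista(lista):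
--     """
--     Organiza uma lista em ordem alfabetica, tomando como base o primeiro item de cada um de seus elementos
--     """
--     arq_ord = []
--     n = len(lista)
--     disp = list(range(n))
--     while len(disp) > 0:
--         menor = disp[0]
--         for i in range(len(disp)):
--             if alfabetica(lista[disp[i]][0], lista[menor][0]):
--                 menor = disp[i]
--         arq_ord.append(menor)
--         disp.pop(disp.index(menor))
--
--     return arq_ord
-- ===== SOURCE B (Python) =====
-- def alfabetica(palavra_a, palavra_b):
--     """
--     Verifica se a palavra_a vem antes da palavra_b na ordem alfabética, se isso ocorrer ela retorna
--     True, se for o contrário retorna False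
--     """
--     resp = False
--     for i in range(len(palavra_b)):
--         if i < len(palavra_a):
--             if palavra_a[i] != palavra_b[i]:
--                 if palavra_a[i] < palavra_b[i] :
--                     resp = True
--                 else:
--                     resp = False
--                 return resp
--         else:
--             resp = True
--     return resp
--
-- def ord_lista(lista):
--     """
--     Insertion sort over indices: each new index j is inserted just after all
--     already-placed indices whose first element is not alphabetically greater.
--     """
--     arq_ord = []
--     for j in range(len(lista)):
--         k = 0
--         while k < len(arq_ord) and not alfabetica(lista[j][0], lista[arq_ord[k]][0]):
--             k += 1
--         arq_ord.insert(k, j)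
--     return arq_ord
-- ===== Notes on version B (the rewrite author's own statement) =====
-- stated objective: alternative
-- what changed: Replaces A's selection sort (repeatedly scanning the remaining-index list for the alphabetical minimum, then popping it) by a stable insertion sort that inserts each index in order into the already-sorted prefix, keeping the same alfabetica comparator.
import Mathlib
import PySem

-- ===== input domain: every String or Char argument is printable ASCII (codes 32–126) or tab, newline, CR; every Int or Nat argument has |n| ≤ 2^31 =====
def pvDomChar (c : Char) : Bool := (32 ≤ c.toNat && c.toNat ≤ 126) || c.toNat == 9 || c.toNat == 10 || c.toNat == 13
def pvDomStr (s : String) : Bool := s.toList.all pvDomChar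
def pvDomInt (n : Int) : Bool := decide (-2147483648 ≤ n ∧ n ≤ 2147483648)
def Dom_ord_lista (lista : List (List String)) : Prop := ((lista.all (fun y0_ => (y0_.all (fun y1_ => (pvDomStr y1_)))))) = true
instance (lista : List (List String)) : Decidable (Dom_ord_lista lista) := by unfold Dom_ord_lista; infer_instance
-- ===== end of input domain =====

-- B replaces A's selection sort over remaining indices by a stable insertion sort over indices (alternative decomposition, same comparator).


-- ===== PORT A =====
-- 'for i in range(len(palavra_b))' with the running 'i < len(palavra_a)' check, consumed structurally
def alfAux : List Char → List Char → Bool → Bool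
  | _, [], resp => resp
  | [], _ :: b, _ => alfAux [] b true
  | x :: a, y :: b, resp => if x ≠ y then decide (x < y) else alfAux a b resp

def alfabetica (palavra_a palavra_b : String) : Bool :=
  alfAux palavra_a.toList palavra_b.toList false

-- lista[j][0]; the defaults are never reached under Pre_ (indices in range, inner lists nonempty)
def key0 (lista : List (List String)) (j : Int) : String :=
  PySem.List.pyGetD (PySem.List.pyGetD lista j []) 0 ""

-- the inner 'for i in range(len(disp))' selecting 'menor'
def selMin (lista : List (List String)) (disp : List Int) (m0 : Int) : Int :=
  (PySem.List.pyRange 0 (disp.length : Int) 1).foldl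
    (fun menor i =>
      if alfabetica (key0 lista (PySem.List.pyGetD disp i 0)) (key0 lista menor)
      then PySem.List.pyGetD disp i 0 else menor) m0

lemma pop_getD_length_lt (xs : List Int) (i : Int) (hx : xs ≠ []) :
    (((PySem.List.pop? xs i).getD (0, [])).2).length < xs.length := by
  cases h : PySem.List.pop? xs i with
  | none => cases xs with | nil => exact absurd rfl hx | cons a t => simp
  | some r =>
    have := PySem.List.length_of_pop?_eq_some xs h
    simp only [Option.getD_some]
    omega

-- the 'while len(disp) > 0' loop of ord_lista
def selLoop (lista : List (List String)) (arq : List Int) (disp : List Int) : List Int :=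
  match disp with
  | [] => arq
  | d :: ds =>
    let menor := selMin lista (d :: ds) d
    let disp' := ((PySem.List.pop? (d :: ds)
        (((PySem.List.index? (d :: ds) menor).getD 0 : Nat) : Int)).getD (0, [])).2
    selLoop lista (arq ++ [menor]) disp'
termination_by disp.length
decreasing_by exact pop_getD_length_lt _ _ (by simp)

def ord_lista (lista : List (List String)) : List Int :=
  selLoop lista [] (PySem.List.pyRange 0 (lista.length : Int) 1)

-- ===== PORT B =====
-- the 'while k < len(arq_ord) and not alfabetica(...)' scan followed by 'arq_ord.insert(k, j)'
def insIdx (lista : List (List String)) (j : Int) : List Int → List Int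
  | [] => [j]
  | m :: rest =>
    if alfabetica (key0 lista j) (key0 lista m) then j :: m :: rest
    else m :: insIdx lista j rest

def ord_lista_alt (lista : List (List String)) : List Int :=
  (PySem.List.pyRange 0 (lista.length : Int) 1).foldl (fun arq j => insIdx lista j arq) []

-- ===== PRECONDITION & SPEC =====
-- Pre_ excludes exactly the inputs on which Python A raises: an inner list that is empty makes lista[j][0] an IndexError.
def Pre_ord_lista (lista : List (List String)) : Prop := ∀ e ∈ lista, e ≠ []
instance (lista : List (List String)) : Decidable (Pre_ord_lista lista) := by unfold Pre_ord_lista; infer_instance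
def pvWitness_ord_lista : List (List String) := [["b", "x"], ["a"]]

def Spec_ord_lista (lista : List (List String)) (out : List Int) : Prop := out = ord_lista_alt lista
instance (lista : List (List String)) (out : List Int) : Decidable (Spec_ord_lista lista out) := by unfold Spec_ord_lista; infer_instance

-- ===== CLAIM (what is proved, stated in full; the proofs are below) =====
def Claim_equal_ord_lista : Prop := ∀ (lista : List (List String)), Dom_ord_lista lista → Pre_ord_lista lista → Spec_ord_lista lista (ord_lista lista)

-- ===== LEMMAS AND PROOFS =====

lemma alfAux_nil_true : ∀ b : List Char, alfAux [] b true = true := by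
  intro b; induction b with
  | nil => rfl
  | cons y b ih => simpa [alfAux] using ih

lemma alfAux_eq : ∀ (b a : List Char), alfAux a b false = decide (a < b) := by
  intro b; induction b with
  | nil => intro a; simp [alfAux.eq_def, List.not_lt_nil]
  | cons y b ih =>
    intro a
    cases a with
    | nil => simp [alfAux, alfAux_nil_true, List.nil_lt_cons]
    | cons x a' =>
      by_cases hxy : x = y
      · subst hxy
        simp [alfAux, ih]
      · simp [alfAux, hxy, List.cons_lt_cons_iff]

def Kf (lista : List (List String)) (j : Int) : List Char := (key0 lista j).toList

def Rr (lista : List (List String)) (i j : Int) : Prop :=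
  Kf lista i < Kf lista j ∨ (Kf lista i = Kf lista j ∧ i < j)

lemma alf_key (lista : List (List String)) (i j : Int) :
    alfabetica (key0 lista i) (key0 lista j) = decide (Kf lista i < Kf lista j) := by
  simp [alfabetica, alfAux_eq, Kf]

lemma Rr_asymm (lista : List (List String)) (i j : Int) :
    Rr lista i j → Rr lista j i → False := by
  rintro (h1 | ⟨e1, l1⟩) (h2 | ⟨e2, l2⟩)
  · exact absurd h2 (lt_asymm h1)
  · exact absurd h1 (by rw [e2]; exact lt_irrefl _)
  · exact absurd h2 (by rw [e1]; exact lt_irrefl _)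
  · omega

-- the selection fold over the remaining indices picks the first index with minimal key;
-- with l ascending that is the Rr-minimum
lemma foldMin_spec (lista : List (List String)) :
    ∀ (l : List Int) (m0 : Int), (∀ x ∈ l, m0 < x) → l.Pairwise (· < ·) →
    (l.foldl (fun m x => if Kf lista x < Kf lista m then x else m) m0 = m0 ∨
     l.foldl (fun m x => if Kf lista x < Kf lista m then x else m) m0 ∈ l) ∧
    (∀ x, (x = m0 ∨ x ∈ l) →
      x ≠ l.foldl (fun m x => if Kf lista x < Kf lista m then x else m) m0 →
      Rr lista (l.foldl (fun m x => if Kf lista x < Kf lista m then x else m) m0) x) := by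
  intro l
  induction l with
  | nil =>
    intro m0 _ _
    refine ⟨Or.inl rfl, ?_⟩
    intro x hx hne
    rcases hx with h | h
    · subst h; simp at hne
    · cases h
  | cons a l ih =>
    intro m0 hgt hp
    have ha : m0 < a := hgt a (List.mem_cons_self)
    have hpc : ∀ x ∈ l, a < x := fun x hx => List.rel_of_pairwise_cons hp hx
    simp only [List.foldl_cons]
    set m1 : Int := if Kf lista a < Kf lista m0 then a else m0 with hm1
    have hgt' : ∀ x ∈ l, m1 < x := by
      intro x hx
      rw [hm1]; split
      · exact hpc x hx
      · exact hgt x (List.mem_cons_of_mem _ hx)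
    obtain ⟨hmem, hmin⟩ := ih m1 hgt' hp.of_cons
    set res : Int := l.foldl (fun m x => if Kf lista x < Kf lista m then x else m) m1 with hres
    have hm1mem : m1 = a ∨ m1 = m0 := by rw [hm1]; split <;> simp
    have hresmem : res = m0 ∨ res ∈ a :: l := by
      rcases hmem with h | h
      · rcases hm1mem with h' | h'
        · exact Or.inr (h ▸ h' ▸ List.mem_cons_self)
        · exact Or.inl (h.trans h')
      · exact Or.inr (List.mem_cons_of_mem _ h)
    have hkey_le_m1 : Kf lista res ≤ Kf lista m1 := by
      by_cases he : res = m1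
      · rw [he]
      · rcases hmin m1 (Or.inl rfl) (Ne.symm he) with hk | ⟨hk, _⟩
        · exact le_of_lt hk
        · exact le_of_eq hk
    refine ⟨hresmem, ?_⟩
    intro x hx hne
    rcases hx with h | h
    · by_cases hcmp : Kf lista a < Kf lista m0
      · have hma : m1 = a := by rw [hm1, if_pos hcmp]
        rw [h]
        exact Or.inl (lt_of_le_of_lt (hma ▸ hkey_le_m1) hcmp)
      · have hmm : m1 = m0 := by rw [hm1, if_neg hcmp]
        exact hmin x (Or.inl (h.trans hmm.symm)) hne
    · rcases List.mem_cons.mp h with h' | h'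
      · by_cases hcmp : Kf lista a < Kf lista m0
        · have hma : m1 = a := by rw [hm1, if_pos hcmp]
          exact hmin x (Or.inl (h'.trans hma.symm)) hne
        · have hmm : m1 = m0 := by rw [hm1, if_neg hcmp]
          have hk : Kf lista res ≤ Kf lista x := by
            rw [h']; exact le_trans hkey_le_m1 (by rw [hmm]; exact le_of_not_gt hcmp)
          rcases lt_or_eq_of_le hk with hlt | heq
          · exact Or.inl hlt
          · refine Or.inr ⟨heq, ?_⟩
            rcases hresmem with h0 | hmemc
            · rw [h', h0]; exact ha
            · rcases List.mem_cons.mp hmemc with h1 | h1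
              · exact absurd (h'.trans h1.symm) hne
              · by_cases he : res = m1
                · rw [h', he, hmm]; exact ha
                · rcases hmin m1 (Or.inl rfl) (Ne.symm he) with hk' | ⟨_, hlt'⟩
                  · exfalso
                    rw [hmm] at hk'
                    rw [heq, h'] at hk'
                    exact hcmp hk'
                  · rw [h']; rw [hmm] at hlt'; omega
      · exact hmin x (Or.inr h') hne

lemma selMin_eq (lista : List (List String)) (disp : List Int) (m0 : Int) :
    selMin lista disp m0 = disp.foldl (fun m x => if Kf lista x < Kf lista m then x else m) m0 := by
  unfold selMin
  rw [PySem.List.foldl_pyRange_zero_pyGetD' disp 0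
    (fun m v => if alfabetica (key0 lista v) (key0 lista m) then v else m) m0]
  have hfe : (fun (m v : Int) => if alfabetica (key0 lista v) (key0 lista m) then v else m)
      = fun m v => if Kf lista v < Kf lista m then v else m := by
    funext m v
    rw [alf_key]
    simp
  rw [hfe]

lemma selMin_spec (lista : List (List String)) (d : Int) (ds : List Int)
    (hp : (d :: ds).Pairwise (· < ·)) :
    selMin lista (d :: ds) d ∈ d :: ds ∧
    ∀ x ∈ d :: ds, x ≠ selMin lista (d :: ds) d → Rr lista (selMin lista (d :: ds) d) x := by
  rw [selMin_eq]
  have h0 : (d :: ds).foldl (fun m x => if Kf lista x < Kf lista m then x else m) d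
      = ds.foldl (fun m x => if Kf lista x < Kf lista m then x else m) d := by
    simp [List.foldl_cons]
  rw [h0]
  obtain ⟨hmem, hmin⟩ := foldMin_spec lista ds d
    (fun x hx => List.rel_of_pairwise_cons hp hx) hp.of_cons
  constructor
  · rcases hmem with h | h
    · rw [h]; exact List.mem_cons_self
    · exact List.mem_cons_of_mem _ h
  · intro x hx hne
    rcases List.mem_cons.mp hx with h | h
    · exact hmin x (Or.inl h) hne
    · exact hmin x (Or.inr h) hne

lemma selLoop_spec (lista : List (List String)) :
    ∀ (n : Nat) (disp : List Int), disp.length ≤ n → ∀ (arq : List Int),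
      disp.Pairwise (· < ·) →
      ∃ out, selLoop lista arq disp = arq ++ out ∧ out.Perm disp ∧ out.Pairwise (Rr lista) := by
  intro n
  induction n with
  | zero =>
    intro disp hlen arq _
    have : disp = [] := List.length_eq_zero_iff.mp (Nat.le_zero.mp hlen)
    subst this
    exact ⟨[], by simp [selLoop], List.Perm.refl _, List.Pairwise.nil⟩
  | succ n ih =>
    intro disp hlen arq hp
    cases disp with
    | nil => exact ⟨[], by simp [selLoop], List.Perm.refl _, List.Pairwise.nil⟩
    | cons d ds =>
      obtain ⟨hmem, hmin⟩ := selMin_spec lista d ds hp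
      obtain ⟨k, hk⟩ : ∃ k, PySem.List.index? (d :: ds) (selMin lista (d :: ds) d) = some k :=
        Option.isSome_iff_exists.mp ((PySem.List.index?_isSome_iff _ _).mpr hmem)
      obtain ⟨hklt, hgetk, -⟩ := PySem.List.getElem_of_index?_eq_some hk
      have hpop : PySem.List.pop? (d :: ds) ((k : Nat) : Int)
          = some ((d :: ds)[k], (d :: ds).eraseIdx k) := PySem.List.pop?_natCast _ k hklt
      have hstep : selLoop lista arq (d :: ds)
          = selLoop lista (arq ++ [selMin lista (d :: ds) d]) ((d :: ds).eraseIdx k) := by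
        rw [selLoop]
        simp only [hk, Option.getD_some, hpop]
      have hperm1 : (d :: ds).Perm (selMin lista (d :: ds) d :: (d :: ds).eraseIdx k) := by
        have h2 := List.getElem_cons_eraseIdx_perm hklt
        rw [hgetk] at h2
        exact h2.symm
      have hpw' : ((d :: ds).eraseIdx k).Pairwise (· < ·) :=
        hp.sublist (List.eraseIdx_sublist _ k)
      have hlen' : ((d :: ds).eraseIdx k).length ≤ n := by
        have := List.length_eraseIdx_of_lt hklt
        omega
      obtain ⟨out', heq', hperm', hpw''⟩ := ih _ hlen' (arq ++ [selMin lista (d :: ds) d]) hpw'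
      refine ⟨selMin lista (d :: ds) d :: out', ?_, ?_, ?_⟩
      · rw [hstep, heq']; simp
      · exact ((hperm'.cons _).trans hperm1.symm)
      · refine List.pairwise_cons.mpr ⟨?_, hpw''⟩
        intro x hx
        have hxe : x ∈ (d :: ds).eraseIdx k := hperm'.mem_iff.mp hx
        have hxd : x ∈ d :: ds := (List.eraseIdx_sublist _ k).mem hxe
        have hnodup : (d :: ds).Nodup := hp.imp (fun h => by omega)
        have hne : x ≠ selMin lista (d :: ds) d := by
          intro h
          have : (selMin lista (d :: ds) d :: (d :: ds).eraseIdx k).Nodup :=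
            hperm1.nodup_iff.mp hnodup
          exact (List.nodup_cons.mp this).1 (h ▸ hxe)
        exact hmin x hxd hne

lemma insIdx_spec (lista : List (List String)) (j : Int) :
    ∀ (arq : List Int), (∀ m ∈ arq, m < j) → arq.Pairwise (Rr lista) →
      (insIdx lista j arq).Perm (j :: arq) ∧ (insIdx lista j arq).Pairwise (Rr lista) := by
  intro arq
  induction arq with
  | nil => intro _ _; exact ⟨List.Perm.refl _, List.pairwise_singleton _ _⟩
  | cons m rest ih =>
    intro hlt hp
    by_cases hc : Kf lista j < Kf lista m
    · have : insIdx lista j (m :: rest) = j :: m :: rest := by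
        simp [insIdx, alf_key, hc]
      rw [this]
      refine ⟨List.Perm.refl _, List.pairwise_cons.mpr ⟨?_, hp⟩⟩
      intro x hx
      rcases List.mem_cons.mp hx with h | h
      · exact Or.inl (h ▸ hc)
      · rcases List.rel_of_pairwise_cons hp h with h' | ⟨h', _⟩
        · exact Or.inl (lt_trans hc h')
        · exact Or.inl (h' ▸ hc)
    · have : insIdx lista j (m :: rest) = m :: insIdx lista j rest := by
        simp [insIdx, alf_key, hc]
      rw [this]
      obtain ⟨hperm, hpw⟩ := ih (fun x hx => hlt x (List.mem_cons_of_mem _ hx)) hp.of_cons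
      refine ⟨?_, List.pairwise_cons.mpr ⟨?_, hpw⟩⟩
      · exact (hperm.cons m).trans (List.Perm.swap j m rest)
      · intro x hx
        rcases List.mem_cons.mp (hperm.mem_iff.mp hx) with h | h
        · subst h
          rcases lt_or_eq_of_le (le_of_not_gt hc) with h' | h'
          · exact Or.inl h'
          · exact Or.inr ⟨h', hlt m List.mem_cons_self⟩
        · exact List.rel_of_pairwise_cons hp h

lemma alt_fold_spec (lista : List (List String)) :
    ∀ n : Nat,
      ((PySem.List.pyRange 0 (n : Int) 1).foldl (fun arq j => insIdx lista j arq) []).Perm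
        (PySem.List.pyRange 0 (n : Int) 1) ∧
      ((PySem.List.pyRange 0 (n : Int) 1).foldl (fun arq j => insIdx lista j arq) []).Pairwise (Rr lista) := by
  intro n
  induction n with
  | zero => simp [PySem.List.pyRange_one_eq_nil]
  | succ n ih =>
    obtain ⟨hperm, hpw⟩ := ih
    have hsplit : PySem.List.pyRange 0 ((n + 1 : Nat) : Int) 1
        = PySem.List.pyRange 0 (n : Int) 1 ++ [(n : Int)] := by
      push_cast
      exact PySem.List.pyRange_one_succ_right (by positivity)
    rw [hsplit, List.foldl_append]
    simp only [List.foldl_cons, List.foldl_nil]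
    have hlt : ∀ m ∈ (PySem.List.pyRange 0 (n : Int) 1).foldl (fun arq j => insIdx lista j arq) [],
        m < (n : Int) := by
      intro m hm
      have := hperm.mem_iff.mp hm
      exact ((PySem.List.mem_pyRange_one).mp this).2
    obtain ⟨hperm', hpw'⟩ := insIdx_spec lista (n : Int) _ hlt hpw
    refine ⟨?_, hpw'⟩
    exact hperm'.trans ((hperm.cons _).trans (List.perm_append_singleton _ _).symm)

theorem final_eq (lista : List (List String)) : ord_lista lista = ord_lista_alt lista := by
  obtain ⟨outA, heqA, hpermA, hpwA⟩ :=
    selLoop_spec lista (PySem.List.pyRange 0 (lista.length : Int) 1).length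
      (PySem.List.pyRange 0 (lista.length : Int) 1) le_rfl []
      (PySem.List.pairwise_lt_pyRange_one _ _)
  obtain ⟨hpermB, hpwB⟩ := alt_fold_spec lista lista.length
  have hA : ord_lista lista = outA := by
    unfold ord_lista; rw [heqA]; simp
  have hB : ord_lista_alt lista
      = (PySem.List.pyRange 0 (lista.length : Int) 1).foldl (fun arq j => insIdx lista j arq) [] := rfl
  rw [hA, hB]
  exact List.Perm.eq_of_pairwise
    (fun a b _ _ h1 h2 => (Rr_asymm lista a b h1 h2).elim)
    hpwA hpwB (hpermA.trans hpermB.symm)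

-- ===== VERDICT (by name: the statement is the Claim_ definition above) =====
theorem ord_lista_spec : Claim_equal_ord_lista := by
  intro lista _ _
  unfold Spec_ord_lista
  exact final_eq lista
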